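-- pv_equiv track=rewrite | github.com/chenaaron3/shortsgen | services/python-generator/scripts/chunker/line_split.py | _even_line_ranges
-- ===== SOURCE A (Python) =====
-- def _even_line_ranges(total_lines: int, num_chunks: int) -> list[tuple[int, int]]:
--     """1-based inclusive (start, end) ranges covering all lines; distribute remainder across first chunks."""
--     if num_chunks <= 0 or total_lines <= 0:
--         return []
--     base_size = total_lines // num_chunks
--     remainder = total_lines % num_chunks
--     ranges: list[tuple[int, int]] = []
--     start = 1
--     for i in range(num_chunks):
--         length = base_size + (1 if i < remainder else 0)
--         if length <= 0:
--             continue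
--         end = start + length - 1
--         ranges.append((start, end))
--         start = end + 1
--     return ranges
-- ===== SOURCE B (Python) =====
-- def _even_line_ranges(total_lines: int, num_chunks: int) -> list[tuple[int, int]]:
--     """1-based inclusive (start, end) ranges covering all lines; distribute remainder across first chunks."""
--     if num_chunks <= 0 or total_lines <= 0:
--         return []
--     base, rem = divmod(total_lines, num_chunks)
--     count = num_chunks if base > 0 else rem
--     return [(i * base + min(i, rem) + 1, (i + 1) * base + min(i + 1, rem))
--             for i in range(count)]
-- ===== Notes on version B (the rewrite author's own statement) =====
-- stated objective: alternative
-- what changed: Replaces A's running start accumulator and skip-branch loop by a closed-form per-index formula (start = i*base + min(i, rem) + 1) mapped over the number of actually produced chunks (num_chunks if base > 0 else rem).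
import Mathlib
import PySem

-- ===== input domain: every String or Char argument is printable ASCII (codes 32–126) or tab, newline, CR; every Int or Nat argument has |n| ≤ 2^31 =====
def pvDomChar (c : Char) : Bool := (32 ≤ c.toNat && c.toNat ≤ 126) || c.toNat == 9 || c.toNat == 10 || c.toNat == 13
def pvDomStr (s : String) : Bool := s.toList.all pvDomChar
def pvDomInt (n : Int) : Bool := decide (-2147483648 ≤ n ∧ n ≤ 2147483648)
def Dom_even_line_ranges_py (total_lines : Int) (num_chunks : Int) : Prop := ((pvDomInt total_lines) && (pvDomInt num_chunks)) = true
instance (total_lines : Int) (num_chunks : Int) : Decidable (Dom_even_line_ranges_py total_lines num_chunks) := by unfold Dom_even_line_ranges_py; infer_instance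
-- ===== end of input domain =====

-- B replaces A's running `start` accumulator and skip branch by a closed-form
-- per-index formula (start = i*base + min(i, rem) + 1) mapped over the produced
-- chunk count; objective: alternative (accumulator loop → index formula).

-- ===== PORT A =====
-- loop body of A's for-loop, named so the proofs can speak about it
def stepA (q r : Int) (st : List (Int × Int) × Int) (i : Int) : List (Int × Int) × Int :=
  if q + (if i < r then 1 else 0) ≤ 0 then st
  else (st.1 ++ [(st.2, st.2 + (q + (if i < r then 1 else 0)) - 1)],
        st.2 + (q + (if i < r then 1 else 0)))

def even_line_ranges_py (total_lines : Int) (num_chunks : Int) : List (Int × Int) :=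
  if num_chunks ≤ 0 ∨ total_lines ≤ 0 then []
  else
    let base := PySem.Int.floordiv total_lines num_chunks
    let rem := PySem.Int.mod total_lines num_chunks
    ((PySem.List.pyRange 0 num_chunks 1).foldl (stepA base rem) ([], 1)).1

-- ===== PORT B =====
-- the closed-form chunk for index i (B's comprehension body)
def chunkB (q r : Int) (i : Int) : Int × Int :=
  (i * q + min i r + 1, (i + 1) * q + min (i + 1) r)

def even_line_ranges_py_alt (total_lines : Int) (num_chunks : Int) : List (Int × Int) :=
  if num_chunks ≤ 0 ∨ total_lines ≤ 0 then []
  else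
    let base := PySem.Int.floordiv total_lines num_chunks
    let rem := PySem.Int.mod total_lines num_chunks
    let count := if 0 < base then num_chunks else rem
    (PySem.List.pyRange 0 count 1).map (chunkB base rem)

-- ===== PRECONDITION & SPEC =====
def Spec_even_line_ranges_py (total_lines : Int) (num_chunks : Int) (out : List (Int × Int)) : Prop := out = even_line_ranges_py_alt total_lines num_chunks
instance (total_lines : Int) (num_chunks : Int) (out : List (Int × Int)) : Decidable (Spec_even_line_ranges_py total_lines num_chunks out) := by unfold Spec_even_line_ranges_py; infer_instance

-- ===== CLAIM (what is proved, stated in full; the proofs are below) =====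
def Claim_equal_even_line_ranges_py : Prop := ∀ (total_lines : Int) (num_chunks : Int), Dom_even_line_ranges_py total_lines num_chunks → Spec_even_line_ranges_py total_lines num_chunks (even_line_ranges_py total_lines num_chunks)

-- ===== LEMMAS AND PROOFS =====

-- Loop invariant: after the first m iterations the accumulator holds the
-- closed-form chunks of the non-skipped indices and `start` is the closed form.
theorem loop_eq (q r : Int) (hq : 0 ≤ q) (hr : 0 ≤ r) (m : Nat) :
    (PySem.List.pyRange 0 (m : Int) 1).foldl (stepA q r) ([], 1)
    = (((PySem.List.pyRange 0 (m : Int) 1).filter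
          (fun i => decide (0 < q + (if i < r then 1 else 0)))).map (chunkB q r),
       (m : Int) * q + min (m : Int) r + 1) := by
  induction m with
  | zero =>
      rw [PySem.List.pyRange_one_eq_nil (by omega)]
      simp only [List.foldl_nil, List.filter_nil, List.map_nil, Prod.mk.injEq, true_and]
      omega
  | succ k ih =>
      have hsplit : PySem.List.pyRange 0 ((k + 1 : Nat) : Int) 1
          = PySem.List.pyRange 0 (k : Int) 1 ++ [(k : Int)] := by
        push_cast
        exact PySem.List.pyRange_one_succ_right (by omega)
      rw [hsplit, List.foldl_append, ih, List.filter_append, List.map_append]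
      simp only [List.foldl_cons, List.foldl_nil, List.filter_cons, List.filter_nil,
        stepA, decide_eq_true_eq]
      push_cast
      have hmul : ((k : Int) + 1) * q = (k : Int) * q + q := by ring
      split_ifs <;>
        simp only [List.map_cons, List.map_nil, List.append_nil, chunkB, Prod.mk.injEq,
          List.append_cancel_left_eq, List.cons.injEq, min_def, and_true, true_and] <;>
        split_ifs <;> omega

-- ===== VERDICT (by name: the statement is the Claim_ definition above) =====
theorem even_line_ranges_py_spec : Claim_equal_even_line_ranges_py := by
  intro t n _
  unfold Spec_even_line_ranges_py even_line_ranges_py even_line_ranges_py_alt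
  by_cases hg : n ≤ 0 ∨ t ≤ 0
  · rw [if_pos hg, if_pos hg]
  · rw [if_neg hg, if_neg hg]
    push Not at hg
    obtain ⟨hn, ht⟩ := hg
    show ((PySem.List.pyRange 0 n 1).foldl
            (stepA (PySem.Int.floordiv t n) (PySem.Int.mod t n)) ([], 1)).1
        = (PySem.List.pyRange 0
            (if 0 < PySem.Int.floordiv t n then n else PySem.Int.mod t n) 1).map
            (chunkB (PySem.Int.floordiv t n) (PySem.Int.mod t n))
    set q := PySem.Int.floordiv t n with hqdef
    set r := PySem.Int.mod t n with hrdef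
    have hqe : q = t / n := PySem.Int.floordiv_eq_ediv_of_pos hn
    have hre : r = t % n := PySem.Int.mod_eq_emod_of_pos hn
    have hq : 0 ≤ q := by rw [hqe]; exact Int.ediv_nonneg (by omega) (by omega)
    have hr0 : 0 ≤ r := by rw [hre]; exact Int.emod_nonneg t (by omega)
    have hrn : r < n := by rw [hre]; exact Int.emod_lt_of_pos t hn
    have hcast : n = ((n.toNat : Nat) : Int) := (Int.toNat_of_nonneg (by omega)).symm
    rw [hcast, loop_eq q r hq hr0 n.toNat]
    dsimp only
    by_cases hqpos : 0 < q
    · rw [if_pos hqpos]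
      congr 1
      apply List.filter_eq_self.mpr
      intro i _
      simp only [decide_eq_true_eq]
      split <;> omega
    · rw [if_neg hqpos]
      have hq0 : q = 0 := by omega
      have hsplit : PySem.List.pyRange 0 ((n.toNat : Nat) : Int) 1
          = PySem.List.pyRange 0 r 1 ++ PySem.List.pyRange r ((n.toNat : Nat) : Int) 1 :=
        PySem.List.pyRange_one_append 0 r _ hr0 (by omega)
      rw [hsplit, List.filter_append]
      have h1 : (PySem.List.pyRange 0 r 1).filter
          (fun i => decide (0 < q + (if i < r then 1 else 0))) = PySem.List.pyRange 0 r 1 := by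
        apply List.filter_eq_self.mpr
        intro i hi
        rw [PySem.List.mem_pyRange_one] at hi
        simp only [decide_eq_true_eq]
        rw [if_pos hi.2]; omega
      have h2 : (PySem.List.pyRange r ((n.toNat : Nat) : Int) 1).filter
          (fun i => decide (0 < q + (if i < r then 1 else 0))) = [] := by
        apply List.filter_eq_nil_iff.mpr
        intro i hi
        rw [PySem.List.mem_pyRange_one] at hi
        simp only [decide_eq_true_eq]
        rw [if_neg (by omega)]; omega
      rw [h1, h2, List.append_nil]
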